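-- pv_equiv track=rewrite | github.com/ScrollPrize/villa | lasagna/fit.py | _compute_window_grid
-- ===== SOURCE A (Python) =====
-- def _compute_window_grid(
-- 	H: int, W: int, mesh_step: int, window_size: int, overlap: int,
-- ) -> list[tuple[int, int, int, int]]:
-- 	"""Compute window tiles over a (H, W) vertex grid.
--
-- 	window_size and overlap are in fullres voxels.
-- 	Returns list of (h0, h1, w0, w1) in vertex indices.
-- 	"""
-- 	if overlap >= window_size:
-- 		raise ValueError(f"overlap ({overlap}) must be less than window_size ({window_size})")
-- 	win_verts = window_size // mesh_step + 1
-- 	overlap_verts = overlap // mesh_step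
-- 	stride = max(1, win_verts - overlap_verts)
-- 	windows = []
-- 	h = 0
-- 	while h < H:
-- 		h1 = min(h + win_verts, H)
-- 		w = 0
-- 		while w < W:
-- 			w1 = min(w + win_verts, W)
-- 			windows.append((h, h1, w, w1))
-- 			if w1 == W:
-- 				break
-- 			w += stride
-- 		if h1 == H:
-- 			break
-- 		h += stride
-- 	return windows
-- ===== SOURCE B (Python) =====
-- def _compute_window_grid(H, W, mesh_step, window_size, overlap):
--     if overlap >= window_size:
--         raise ValueError(f"overlap ({overlap}) must be less than window_size ({window_size})")
--     win_verts = window_size // mesh_step + 1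
--     overlap_verts = overlap // mesh_step
--     stride = max(1, win_verts - overlap_verts)
--
--     def count(L):
--         # closed-form trip count of the axis loop:
--         # stops at the first start >= L, or one past the first start with start + win_verts >= L
--         if L <= 0:
--             return 0
--         full = -(-L // stride)                               # ceil(L / stride)
--         edge = max(0, -(-(L - win_verts) // stride)) + 1     # first k with k*stride + win_verts >= L, plus 1
--         return min(full, edge)
--
--     nh, nw = count(H), count(W)
--     return [(i * stride, min(i * stride + win_verts, H),
--              j * stride, min(j * stride + win_verts, W))
--             for i in range(nh) for j in range(nw)]
-- ===== Notes on version B (the rewrite author's own statement) =====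
-- stated objective: alternative
-- what changed: Replaces A's iterate-until-break while loops by closed-form trip counts computed with ceiling division per axis, then generates the tiles by index over range(nh) x range(nw) with start = k*stride.
import Mathlib
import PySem

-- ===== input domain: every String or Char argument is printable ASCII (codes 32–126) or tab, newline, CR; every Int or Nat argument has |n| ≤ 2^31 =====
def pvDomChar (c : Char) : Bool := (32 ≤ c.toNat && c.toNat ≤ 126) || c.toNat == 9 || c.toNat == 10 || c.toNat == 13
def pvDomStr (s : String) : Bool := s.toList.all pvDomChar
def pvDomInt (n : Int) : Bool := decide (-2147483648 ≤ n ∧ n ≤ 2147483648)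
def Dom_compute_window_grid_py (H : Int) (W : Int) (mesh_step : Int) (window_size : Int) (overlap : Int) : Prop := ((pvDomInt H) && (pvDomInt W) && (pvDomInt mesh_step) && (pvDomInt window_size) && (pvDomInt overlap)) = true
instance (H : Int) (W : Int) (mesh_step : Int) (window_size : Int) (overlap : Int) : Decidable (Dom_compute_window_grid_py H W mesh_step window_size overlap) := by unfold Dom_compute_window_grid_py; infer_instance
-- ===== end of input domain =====

-- B replaces A's iterate-until-break loops by closed-form trip counts (ceiling division) and index-generated tiles (objective: alternative).
-- ===== PORT A =====
-- inner while loop of A: while w < W: w1 = min(w+win_verts, W); append (h,h1,w,w1); break if w1 == W; w += stride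
def pvAInner (W win_verts stride : Int) (hstride : 1 ≤ stride) (h h1 w : Int)
    (acc : List (Int × Int × Int × Int)) : List (Int × Int × Int × Int) :=
  if _hw : w < W then
    if min (w + win_verts) W = W then acc ++ [(h, h1, w, min (w + win_verts) W)]
    else pvAInner W win_verts stride hstride h h1 (w + stride) (acc ++ [(h, h1, w, min (w + win_verts) W)])
  else acc
termination_by (W - w).toNat
decreasing_by omega

-- outer while loop of A: while h < H: h1 = min(h+win_verts, H); run inner loop; break if h1 == H; h += stride
def pvAOuter (H W win_verts stride : Int) (hstride : 1 ≤ stride) (h : Int)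
    (acc : List (Int × Int × Int × Int)) : List (Int × Int × Int × Int) :=
  if _hh : h < H then
    if min (h + win_verts) H = H then pvAInner W win_verts stride hstride h (min (h + win_verts) H) 0 acc
    else pvAOuter H W win_verts stride hstride (h + stride)
      (pvAInner W win_verts stride hstride h (min (h + win_verts) H) 0 acc)
  else acc
termination_by (H - h).toNat
decreasing_by omega

def compute_window_grid_py (H : Int) (W : Int) (mesh_step : Int) (window_size : Int) (overlap : Int) : List (Int × Int × Int × Int) :=
  let win_verts := PySem.Int.floordiv window_size mesh_step + 1
  let overlap_verts := PySem.Int.floordiv overlap mesh_step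
  let stride := max 1 (win_verts - overlap_verts)
  pvAOuter H W win_verts stride (le_max_left 1 _) 0 []

-- ===== PORT B =====
-- B's count(L): closed-form trip count of one axis (ceil(L/stride) capped at first k with k*stride+win_verts >= L, plus 1)
def pvCount (L stride win_verts : Int) : Int :=
  if L ≤ 0 then 0
  else
    let full := -(PySem.Int.floordiv (-L) stride)
    let edge := max 0 (-(PySem.Int.floordiv (-(L - win_verts)) stride)) + 1
    min full edge

def compute_window_grid_py_alt (H : Int) (W : Int) (mesh_step : Int) (window_size : Int) (overlap : Int) : List (Int × Int × Int × Int) :=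
  let win_verts := PySem.Int.floordiv window_size mesh_step + 1
  let overlap_verts := PySem.Int.floordiv overlap mesh_step
  let stride := max 1 (win_verts - overlap_verts)
  let nh := pvCount H stride win_verts
  let nw := pvCount W stride win_verts
  (PySem.List.pyRange 0 nh 1).flatMap (fun i =>
    (PySem.List.pyRange 0 nw 1).map (fun j =>
      (i * stride, min (i * stride + win_verts) H, j * stride, min (j * stride + win_verts) W)))

-- ===== PRECONDITION & SPEC =====
-- A raises ValueError when overlap >= window_size and ZeroDivisionError when mesh_step == 0; Pre_ excludes exactly those inputs.
def Pre_compute_window_grid_py (H : Int) (W : Int) (mesh_step : Int) (window_size : Int) (overlap : Int) : Prop :=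
  overlap < window_size ∧ mesh_step ≠ 0
instance (H : Int) (W : Int) (mesh_step : Int) (window_size : Int) (overlap : Int) : Decidable (Pre_compute_window_grid_py H W mesh_step window_size overlap) := by unfold Pre_compute_window_grid_py; infer_instance
def pvWitness_compute_window_grid_py : Int × Int × Int × Int × Int := (5, 7, 1, 3, 1)

def Spec_compute_window_grid_py (H : Int) (W : Int) (mesh_step : Int) (window_size : Int) (overlap : Int) (out : List (Int × Int × Int × Int)) : Prop := out = compute_window_grid_py_alt H W mesh_step window_size overlap
instance (H : Int) (W : Int) (mesh_step : Int) (window_size : Int) (overlap : Int) (out : List (Int × Int × Int × Int)) : Decidable (Spec_compute_window_grid_py H W mesh_step window_size overlap out) := by unfold Spec_compute_window_grid_py; infer_instance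

-- ===== CLAIM (what is proved, stated in full; the proofs are below) =====
def Claim_equal_compute_window_grid_py : Prop := ∀ (H : Int) (W : Int) (mesh_step : Int) (window_size : Int) (overlap : Int), Dom_compute_window_grid_py H W mesh_step window_size overlap → Pre_compute_window_grid_py H W mesh_step window_size overlap → Spec_compute_window_grid_py H W mesh_step window_size overlap (compute_window_grid_py H W mesh_step window_size overlap)

-- ===== LEMMAS AND PROOFS =====

-- proof-side recursive trip count of one axis loop
def pvCnt (L wv s : Int) (hs : 1 ≤ s) (start : Int) : Nat :=
  if _h : start < L then
    if min (start + wv) L = L then 1 else 1 + pvCnt L wv s hs (start + s)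
  else 0
termination_by (L - start).toNat
decreasing_by omega

-- ceiling division as Python writes it: -((-x) // s)
def pvCeil (x s : Int) : Int := -(PySem.Int.floordiv (-x) s)

theorem pvCeil_bounds (x s : Int) (hs : 0 < s) :
    (pvCeil x s - 1) * s < x ∧ x ≤ pvCeil x s * s :=
  (PySem.Int.neg_floordiv_neg_eq_iff_of_pos hs).mp rfl

theorem pvCeil_pos (x s : Int) (hs : 0 < s) (hx : 0 < x) : 1 ≤ pvCeil x s := by
  have hb := pvCeil_bounds x s hs
  by_contra hq
  push_neg at hq
  nlinarith [hb.2]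

theorem pvCeil_nonpos (x s : Int) (hs : 0 < s) (hx : x ≤ 0) : pvCeil x s ≤ 0 := by
  have hb := pvCeil_bounds x s hs
  by_contra hq
  push_neg at hq
  nlinarith [hb.1]

theorem pvCeil_one (x s : Int) (hs : 0 < s) (hx : 0 < x) (hxs : x ≤ s) : pvCeil x s = 1 := by
  have hb := pvCeil_bounds x s hs
  have h1 := pvCeil_pos x s hs hx
  by_contra hq
  have h2 : 2 ≤ pvCeil x s := by omega
  nlinarith [hb.1]

theorem pvCeil_shift (x s : Int) (hs : 0 < s) : pvCeil (x - s) s = pvCeil x s - 1 := by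
  have hb := pvCeil_bounds x s hs
  show -(PySem.Int.floordiv (-(x - s)) s) = pvCeil x s - 1
  rw [PySem.Int.neg_floordiv_neg_eq_iff_of_pos hs]
  constructor <;> nlinarith [hb.1, hb.2]

theorem pvCnt_closed (L wv s : Int) (hs : 1 ≤ s) (start : Int) :
    (pvCnt L wv s hs start : Int)
      = if start < L then min (pvCeil (L - start) s) (max 0 (pvCeil (L - start - wv) s) + 1) else 0 := by
  have hspos : 0 < s := by omega
  fun_induction pvCnt L wv s hs start with
  | case1 start hlt hedge =>
      have hwv : L ≤ start + wv := by omega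
      have ha := pvCeil_pos (L - start) s hspos (by omega)
      have hb := pvCeil_nonpos (L - start - wv) s hspos (by omega)
      simp only [hlt, if_pos]
      omega
  | case2 start hlt hedge ih =>
      have hwv : start + wv < L := by omega
      have ha := pvCeil_pos (L - start) s hspos (by omega)
      have hbpos := pvCeil_pos (L - start - wv) s hspos (by omega)
      by_cases hnext : start + s < L
      · simp only [hnext, if_pos] at ih
        simp only [show L - (start + s) = L - start - s from by ring] at ih
        rw [show L - start - s - wv = L - start - wv - s from by ring,
            pvCeil_shift (L - start - wv) s hspos, pvCeil_shift (L - start) s hspos] at ih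
        simp only [hlt, if_pos]
        push_cast
        omega
      · have hz : pvCnt L wv s hs (start + s) = 0 := by rw [pvCnt]; simp [hnext]
        have h1 : pvCeil (L - start) s = 1 := pvCeil_one _ s hspos (by omega) (by omega)
        simp only [hlt, if_pos, hz, h1]
        push_cast
        omega
  | case3 start hge =>
      simp [hge]

theorem pvCount_eq_cnt (L s wv : Int) (hs : 1 ≤ s) :
    pvCount L s wv = (pvCnt L wv s hs 0 : Int) := by
  rw [pvCnt_closed]
  unfold pvCount
  by_cases hL : L ≤ 0
  · simp [hL, show ¬ (0:Int) < L by omega]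
  · simp only [hL, if_neg, show (0:Int) < L by omega, if_pos, sub_zero]
    rfl

theorem pvCnt_edge (L wv s : Int) (hs : 1 ≤ s) (start : Int)
    (hlt : start < L) (hedge : min (start + wv) L = L) : pvCnt L wv s hs start = 1 := by
  rw [pvCnt]; simp [hlt, hedge]

theorem pvCnt_step (L wv s : Int) (hs : 1 ≤ s) (start : Int)
    (hlt : start < L) (hedge : ¬ min (start + wv) L = L) :
    pvCnt L wv s hs start = pvCnt L wv s hs (start + s) + 1 := by
  rw [pvCnt]; simp only [hlt, dif_pos, if_neg hedge]; omega

theorem pvCnt_stop (L wv s : Int) (hs : 1 ≤ s) (start : Int)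
    (hge : ¬ start < L) : pvCnt L wv s hs start = 0 := by
  rw [pvCnt]; simp [hge]

theorem pvRangeMapShift {a : Type} (n : Nat) (f g : Nat → a) (hfg : ∀ j, f (j + 1) = g j) :
    (List.range (n + 1)).map f = f 0 :: (List.range n).map g := by
  rw [List.range_succ_eq_map, List.map_cons, List.map_map]
  congr 1
  apply List.map_congr_left
  intro j _
  simp [hfg j]

theorem pvRangeFlatMapShift {a : Type} (n : Nat) (f g : Nat → List a) (hfg : ∀ j, f (j + 1) = g j) :
    (List.range (n + 1)).flatMap f = f 0 ++ (List.range n).flatMap g := by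
  rw [List.range_succ_eq_map, List.flatMap_cons, List.flatMap_map]
  congr 1
  apply List.flatMap_congr
  intro j _
  simp [hfg j]

theorem pvAInner_eq (W wv s : Int) (hs : 1 ≤ s) (h h1 w : Int)
    (acc : List (Int × Int × Int × Int)) :
    pvAInner W wv s hs h h1 w acc
      = acc ++ (List.range (pvCnt W wv s hs w)).map
          (fun (j : Nat) => (h, h1, w + (j : Int) * s, min (w + (j : Int) * s + wv) W)) := by
  fun_induction pvAInner W wv s hs h h1 w acc with
  | case1 w acc hw hedge =>
      rw [pvCnt_edge W wv s hs w hw hedge]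
      simp
  | case2 w acc hw hedge ih =>
      rw [pvCnt_step W wv s hs w hw hedge, ih,
          pvRangeMapShift (pvCnt W wv s hs (w + s))
            (fun (j : Nat) => (h, h1, w + (j : Int) * s, min (w + (j : Int) * s + wv) W))
            (fun (j : Nat) => (h, h1, w + s + (j : Int) * s, min (w + s + (j : Int) * s + wv) W))
            (fun j => by
              push_cast
              have e : w + ((j : Int) + 1) * s = w + s + (j : Int) * s := by ring
              rw [e])]
      simp
  | case3 w acc hw =>
      rw [pvCnt_stop W wv s hs w hw]
      simp

theorem pvAOuter_eq (H W wv s : Int) (hs : 1 ≤ s) (h : Int)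
    (acc : List (Int × Int × Int × Int)) :
    pvAOuter H W wv s hs h acc
      = acc ++ (List.range (pvCnt H wv s hs h)).flatMap
          (fun (i : Nat) => (List.range (pvCnt W wv s hs 0)).map
            (fun (j : Nat) => (h + (i : Int) * s, min (h + (i : Int) * s + wv) H,
                       (j : Int) * s, min ((j : Int) * s + wv) W))) := by
  fun_induction pvAOuter H W wv s hs h acc with
  | case1 h acc hh hedge =>
      rw [pvCnt_edge H wv s hs h hh hedge, pvAInner_eq]
      simp [hedge]
  | case2 h acc hh hedge ih =>
      rw [pvCnt_step H wv s hs h hh hedge, ih, pvAInner_eq,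
          pvRangeFlatMapShift (pvCnt H wv s hs (h + s))
            (fun (i : Nat) => (List.range (pvCnt W wv s hs 0)).map
              (fun (j : Nat) => (h + (i : Int) * s, min (h + (i : Int) * s + wv) H,
                         (j : Int) * s, min ((j : Int) * s + wv) W)))
            (fun (i : Nat) => (List.range (pvCnt W wv s hs 0)).map
              (fun (j : Nat) => (h + s + (i : Int) * s, min (h + s + (i : Int) * s + wv) H,
                         (j : Int) * s, min ((j : Int) * s + wv) W)))
            (fun i => by
              push_cast
              have e : h + ((i : Int) + 1) * s = h + s + (i : Int) * s := by ring
              rw [e])]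
      simp
  | case3 h acc hh =>
      rw [pvCnt_stop H wv s hs h hh]
      simp

-- ===== VERDICT (by name: the statement is the Claim_ definition above) =====
theorem compute_window_grid_py_spec : Claim_equal_compute_window_grid_py := by
  intro H W mesh_step window_size overlap _ _
  unfold Spec_compute_window_grid_py compute_window_grid_py compute_window_grid_py_alt
  dsimp only
  have hs : 1 ≤ max 1 (PySem.Int.floordiv window_size mesh_step + 1 - PySem.Int.floordiv overlap mesh_step) := le_max_left _ _
  rw [pvAOuter_eq, pvCount_eq_cnt H _ _ hs, pvCount_eq_cnt W _ _ hs,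
      PySem.List.pyRange_zero_natCast, PySem.List.pyRange_zero_natCast]
  simp [List.flatMap_map, List.map_map, Function.comp_def, zero_add]
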